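-- pv_equiv track=rewrite | github.com/skintwin-ai/org-skin | src/org_skin/aggregator/analyzer.py | _categorize_pattern
-- ===== SOURCE A (Python) =====
-- def _categorize_pattern(pattern_name: str) -> str:
--     """Categorize a pattern by type."""
--     categories = {
--         "documentation": ["readme", "contributing", "license", "changelog"],
--         "ci_cd": ["github_actions", "travis", "circleci", "gitlab_ci", "jenkins"],
--         "testing": ["pytest", "jest", "mocha", "rspec"],
--         "package_manager": ["npm", "pip", "cargo", "go_mod", "maven", "gradle"],
--         "architecture": ["microservices", "monorepo", "serverless"],
--     }
--
--     for category, patterns in categories.items():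
--         if pattern_name in patterns:
--             return category
--
--     return "other"
-- ===== SOURCE B (Python) =====
-- # Sorted (pattern, category) table searched by binary search instead of scanning
-- # each category's pattern list.
-- _SORTED_PATTERNS = (
--     ("cargo", "package_manager"),
--     ("changelog", "documentation"),
--     ("circleci", "ci_cd"),
--     ("contributing", "documentation"),
--     ("github_actions", "ci_cd"),
--     ("gitlab_ci", "ci_cd"),
--     ("go_mod", "package_manager"),
--     ("gradle", "package_manager"),
--     ("jenkins", "ci_cd"),
--     ("jest", "testing"),
--     ("license", "documentation"),
--     ("maven", "package_manager"),
--     ("microservices", "architecture"),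
--     ("mocha", "testing"),
--     ("monorepo", "architecture"),
--     ("npm", "package_manager"),
--     ("pip", "package_manager"),
--     ("pytest", "testing"),
--     ("readme", "documentation"),
--     ("rspec", "testing"),
--     ("serverless", "architecture"),
--     ("travis", "ci_cd"),
-- )
--
--
-- def _categorize_pattern(pattern_name: str) -> str:
--     """Categorize a pattern by binary search over a sorted pattern table."""
--     lo, hi = 0, len(_SORTED_PATTERNS)
--     while lo < hi:
--         mid = (lo + hi) // 2
--         key, category = _SORTED_PATTERNS[mid]
--         if pattern_name == key:
--             return category
--         if pattern_name < key:
--             hi = mid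
--         else:
--             lo = mid + 1
--     return "other"
-- ===== Notes on version B (the rewrite author's own statement) =====
-- stated objective: alternative
-- what changed: Replaces A's per-call category dict and the loop testing membership in each category's pattern list with a sorted (pattern, category) table searched by a hand-written binary search (divide and conquer on the key order), returning 'other' when the search window empties.
import Mathlib
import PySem

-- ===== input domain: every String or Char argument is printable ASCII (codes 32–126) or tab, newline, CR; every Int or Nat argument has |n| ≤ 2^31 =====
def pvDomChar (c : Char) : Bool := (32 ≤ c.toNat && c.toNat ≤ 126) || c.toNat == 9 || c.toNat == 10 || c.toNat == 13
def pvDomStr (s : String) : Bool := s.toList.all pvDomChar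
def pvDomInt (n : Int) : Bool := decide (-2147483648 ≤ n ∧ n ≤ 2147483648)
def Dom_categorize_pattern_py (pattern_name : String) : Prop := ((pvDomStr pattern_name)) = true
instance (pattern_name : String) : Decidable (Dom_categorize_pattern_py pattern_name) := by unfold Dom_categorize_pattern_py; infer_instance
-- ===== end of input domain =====

-- B replaces A's per-category membership-scan loop with binary search over a sorted
-- (pattern, category) table (objective: alternative algorithm, divide and conquer).

-- ===== PORT A =====
-- the dict literal `categories` of A
def pvCategoriesA : PySem.Dict String (List String) := PySem.Dict.ofList
  [ ("documentation", ["readme", "contributing", "license", "changelog"])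
  , ("ci_cd", ["github_actions", "travis", "circleci", "gitlab_ci", "jenkins"])
  , ("testing", ["pytest", "jest", "mocha", "rspec"])
  , ("package_manager", ["npm", "pip", "cargo", "go_mod", "maven", "gradle"])
  , ("architecture", ["microservices", "monorepo", "serverless"]) ]

-- the `for category, patterns in categories.items(): if pattern_name in patterns: return category` loop
def pvLoopA : List (String × List String) → String → String
  | [], _ => "other"
  | (category, patterns) :: rest, pattern_name =>
      if patterns.contains pattern_name then category else pvLoopA rest pattern_name

def categorize_pattern_py (pattern_name : String) : String :=
  pvLoopA pvCategoriesA.items pattern_name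

-- ===== PORT B =====
-- module-level sorted table _SORTED_PATTERNS of Source B
def pvSortedPatterns : List (String × String) :=
  [ ("cargo", "package_manager"), ("changelog", "documentation")
  , ("circleci", "ci_cd"), ("contributing", "documentation")
  , ("github_actions", "ci_cd"), ("gitlab_ci", "ci_cd")
  , ("go_mod", "package_manager"), ("gradle", "package_manager")
  , ("jenkins", "ci_cd"), ("jest", "testing")
  , ("license", "documentation"), ("maven", "package_manager")
  , ("microservices", "architecture"), ("mocha", "testing")
  , ("monorepo", "architecture"), ("npm", "package_manager")
  , ("pip", "package_manager"), ("pytest", "testing")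
  , ("readme", "documentation"), ("rspec", "testing")
  , ("serverless", "architecture"), ("travis", "ci_cd") ]

-- the `while lo < hi` binary-search loop of Source B (indexing is always in range, so getD's
-- default is never used)
def pvBSearch (pattern_name : String) (lo hi : Nat) : String :=
  if _h : lo < hi then
    let mid := (lo + hi) / 2
    let kv := pvSortedPatterns.getD mid ("", "")
    if pattern_name = kv.1 then kv.2
    else if pattern_name < kv.1 then pvBSearch pattern_name lo mid
    else pvBSearch pattern_name (mid + 1) hi
  else "other"
termination_by hi - lo
decreasing_by all_goals omega

def categorize_pattern_py_alt (pattern_name : String) : String :=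
  pvBSearch pattern_name 0 pvSortedPatterns.length

-- ===== PRECONDITION & SPEC =====
def Spec_categorize_pattern_py (pattern_name : String) (out : String) : Prop := out = categorize_pattern_py_alt pattern_name
instance (pattern_name : String) (out : String) : Decidable (Spec_categorize_pattern_py pattern_name out) := by unfold Spec_categorize_pattern_py; infer_instance

-- ===== CLAIM (what is proved, stated in full; the proofs are below) =====
def Claim_equal_categorize_pattern_py : Prop := ∀ (pattern_name : String), Dom_categorize_pattern_py pattern_name → Spec_categorize_pattern_py pattern_name (categorize_pattern_py pattern_name)

-- ===== LEMMAS AND PROOFS =====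

-- A's dict literal has distinct keys, so its items list is the literal itself
theorem pvItemsA_eq : pvCategoriesA.items =
  [ ("documentation", ["readme", "contributing", "license", "changelog"])
  , ("ci_cd", ["github_actions", "travis", "circleci", "gitlab_ci", "jenkins"])
  , ("testing", ["pytest", "jest", "mocha", "rspec"])
  , ("package_manager", ["npm", "pip", "cargo", "go_mod", "maven", "gradle"])
  , ("architecture", ["microservices", "monorepo", "serverless"]) ] := by decide

-- ===== VERDICT (by name: the statement is the Claim_ definition above) =====
theorem categorize_pattern_py_spec : Claim_equal_categorize_pattern_py := by
  intro s _
  unfold Spec_categorize_pattern_py categorize_pattern_py categorize_pattern_py_alt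
  rw [pvItemsA_eq]
  by_cases h0 : s = "readme"
  · subst h0; simp [pvBSearch, pvSortedPatterns, pvLoopA]; decide
  by_cases h1 : s = "contributing"
  · subst h1; simp [pvBSearch, pvSortedPatterns, pvLoopA]; decide
  by_cases h2 : s = "license"
  · subst h2; simp [pvBSearch, pvSortedPatterns, pvLoopA]; decide
  by_cases h3 : s = "changelog"
  · subst h3; simp [pvBSearch, pvSortedPatterns, pvLoopA]; decide
  by_cases h4 : s = "github_actions"
  · subst h4; simp [pvBSearch, pvSortedPatterns, pvLoopA]; decide
  by_cases h5 : s = "travis"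
  · subst h5; simp [pvBSearch, pvSortedPatterns, pvLoopA]; decide
  by_cases h6 : s = "circleci"
  · subst h6; simp [pvBSearch, pvSortedPatterns, pvLoopA]; decide
  by_cases h7 : s = "gitlab_ci"
  · subst h7; simp [pvBSearch, pvSortedPatterns, pvLoopA]; decide
  by_cases h8 : s = "jenkins"
  · subst h8; simp [pvBSearch, pvSortedPatterns, pvLoopA]; decide
  by_cases h9 : s = "pytest"
  · subst h9; simp [pvBSearch, pvSortedPatterns, pvLoopA]; decide
  by_cases h10 : s = "jest"
  · subst h10; simp [pvBSearch, pvSortedPatterns, pvLoopA]; decide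
  by_cases h11 : s = "mocha"
  · subst h11; simp [pvBSearch, pvSortedPatterns, pvLoopA]; decide
  by_cases h12 : s = "rspec"
  · subst h12; simp [pvBSearch, pvSortedPatterns, pvLoopA]; decide
  by_cases h13 : s = "npm"
  · subst h13; simp [pvBSearch, pvSortedPatterns, pvLoopA]; decide
  by_cases h14 : s = "pip"
  · subst h14; simp [pvBSearch, pvSortedPatterns, pvLoopA]; decide
  by_cases h15 : s = "cargo"
  · subst h15; simp [pvBSearch, pvSortedPatterns, pvLoopA]; decide
  by_cases h16 : s = "go_mod"
  · subst h16; simp [pvBSearch, pvSortedPatterns, pvLoopA]; decide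
  by_cases h17 : s = "maven"
  · subst h17; simp [pvBSearch, pvSortedPatterns, pvLoopA]
  by_cases h18 : s = "gradle"
  · subst h18; simp [pvBSearch, pvSortedPatterns, pvLoopA]; decide
  by_cases h19 : s = "microservices"
  · subst h19; simp [pvBSearch, pvSortedPatterns, pvLoopA]; decide
  by_cases h20 : s = "monorepo"
  · subst h20; simp [pvBSearch, pvSortedPatterns, pvLoopA]; decide
  by_cases h21 : s = "serverless"
  · subst h21; simp [pvBSearch, pvSortedPatterns, pvLoopA]; decide
  simp [pvBSearch, pvSortedPatterns, pvLoopA, h0, h1, h2, h3, h4, h5, h6, h7, h8, h9, h10, h11, h12, h13, h14, h15, h16, h17, h18, h19, h20, h21]
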